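-- pv_equiv track=rewrite | github.com/mea03kkw/vibe_code_assistant | app.py | validate_project_data
-- ===== SOURCE A (Python) =====
-- def validate_project_data(data):
--     """Validate project configuration data"""
--     required_fields = ['project_type', 'timeline', 'difficulty']
--
--     # Check required fields
--     for field in required_fields:
--         if not data.get(field):
--             return False, f'Missing required field: {field}'
--
--     # Validate project type
--     valid_types = ['fullstack', 'frontend', 'backend']
--     if data['project_type'] not in valid_types:
--         return False, f'Invalid project type: {data["project_type"]}'
--
--     # Validate timeline
--     valid_timelines = ['weekend', '1week', '2weeks', '1month', '3months', 'open']
--     if data['timeline'] not in valid_timelines: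
--         return False, f'Invalid timeline: {data["timeline"]}'
--
--     # Validate difficulty
--     valid_difficulties = ['beginner', 'intermediate', 'advanced', 'expert']
--     if data['difficulty'] not in valid_difficulties:
--         return False, f'Invalid difficulty: {data["difficulty"]}'
--
--     return True, None
-- ===== SOURCE B (Python) =====
-- CHECKS = [
--     ('project_type', 'project type', ['fullstack', 'frontend', 'backend']),
--     ('timeline', 'timeline', ['weekend', '1week', '2weeks', '1month', '3months', 'open']),
--     ('difficulty', 'difficulty', ['beginner', 'intermediate', 'advanced', 'expert']),
-- ]
--
-- def validate_project_data(data):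
--     """Validate project configuration data.
--
--     Single pass: classify every field at once into 'missing' or 'invalid'
--     error buckets (no early return), then report the highest-priority error
--     (all missing-field errors rank before all invalid-value errors).
--     """
--     missing = []
--     invalid = []
--     for key, label, allowed in CHECKS:
--         value = data.get(key)
--         if not value:
--             missing.append(f'Missing required field: {key}')
--         elif value not in allowed:
--             invalid.append(f'Invalid {label}: {value}')
--     errors = missing + invalid
--     if errors:
--         return False, errors[0]
--     return True, None
-- ===== Notes on version B (the rewrite author's own statement) =====
-- stated objective: alternative
-- what changed: A early-returns from three staged inline checks; B makes one pass that classifies every field into missing/invalid error buckets without returning, then selects the first error by priority (missing before invalid).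
import Mathlib
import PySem

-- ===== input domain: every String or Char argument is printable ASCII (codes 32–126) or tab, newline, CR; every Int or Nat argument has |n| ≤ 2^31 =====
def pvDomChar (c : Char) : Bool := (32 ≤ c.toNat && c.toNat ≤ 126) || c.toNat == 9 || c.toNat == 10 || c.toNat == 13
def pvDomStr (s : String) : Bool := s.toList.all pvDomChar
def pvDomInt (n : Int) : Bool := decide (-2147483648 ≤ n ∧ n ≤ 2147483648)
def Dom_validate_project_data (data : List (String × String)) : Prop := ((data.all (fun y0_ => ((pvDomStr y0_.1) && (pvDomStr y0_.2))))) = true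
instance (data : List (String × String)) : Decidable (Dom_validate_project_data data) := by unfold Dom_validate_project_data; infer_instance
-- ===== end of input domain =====

-- ===== PORT A =====
-- B: one pass classifying every field into missing/invalid error buckets, then first error by priority; objective: alternative.
-- dict lookup = first match in the association list (type convention)
def aGet (data : List (String × String)) (f : String) : Option String :=
  (data.find? (fun p => p.1 == f)).map (·.2)

-- "not data.get(field)" : None and "" are falsy
def aFalsy : Option String → Bool
  | none => true
  | some s => s == ""

-- A's first for-loop: first required field whose value is falsy
def aMissing (data : List (String × String)) : List String → Option String
  | [] => none
  | f :: rest => if aFalsy (aGet data f) then some f else aMissing data rest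

def validate_project_data (data : List (String × String)) : Bool × Option String :=
  match aMissing data ["project_type", "timeline", "difficulty"] with
  | some f => (false, some ("Missing required field: " ++ f))
  | none =>
    -- after the loop each field is present and non-empty, so data[k] = (aGet data k).getD ""
    let pt := (aGet data "project_type").getD ""
    if !(["fullstack", "frontend", "backend"].contains pt) then
      (false, some ("Invalid project type: " ++ pt))
    else
      let tl := (aGet data "timeline").getD ""
      if !(["weekend", "1week", "2weeks", "1month", "3months", "open"].contains tl) then
        (false, some ("Invalid timeline: " ++ tl))
      else
        let df := (aGet data "difficulty").getD ""
        if !(["beginner", "intermediate", "advanced", "expert"].contains df) then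
          (false, some ("Invalid difficulty: " ++ df))
        else (true, none)

-- ===== PORT B =====
def bChecks : List (String × String × List String) :=
  [("project_type", "project type", ["fullstack", "frontend", "backend"]),
   ("timeline", "timeline", ["weekend", "1week", "2weeks", "1month", "3months", "open"]),
   ("difficulty", "difficulty", ["beginner", "intermediate", "advanced", "expert"])]

def bGet (data : List (String × String)) (k : String) : Option String :=
  (data.find? (fun p => p.1 == k)).map (·.2)

-- the body of Source B's single loop: append to the missing or invalid bucket
def bStep (data : List (String × String)) (acc : List String × List String)
    (c : String × String × List String) : List String × List String :=
  match bGet data c.1 with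
  | none => (acc.1 ++ ["Missing required field: " ++ c.1], acc.2)
  | some v =>
    if v == "" then (acc.1 ++ ["Missing required field: " ++ c.1], acc.2)
    else if !(c.2.2.contains v) then (acc.1, acc.2 ++ ["Invalid " ++ c.2.1 ++ ": " ++ v])
    else acc

def validate_project_data_alt (data : List (String × String)) : Bool × Option String :=
  let buckets := bChecks.foldl (bStep data) ([], [])
  match (buckets.1 ++ buckets.2).head? with
  | some msg => (false, some msg)
  | none => (true, none)

-- ===== PRECONDITION & SPEC =====
def Spec_validate_project_data (data : List (String × String)) (out : Bool × Option String) : Prop := out = validate_project_data_alt data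
instance (data : List (String × String)) (out : Bool × Option String) : Decidable (Spec_validate_project_data data out) := by unfold Spec_validate_project_data; infer_instance

-- ===== CLAIM (what is proved, stated in full; the proofs are below) =====
def Claim_equal_validate_project_data : Prop := ∀ (data : List (String × String)), Dom_validate_project_data data → Spec_validate_project_data data (validate_project_data data)

-- ===== LEMMAS AND PROOFS =====

-- ===== VERDICT (by name: the statement is the Claim_ definition above) =====
set_option maxHeartbeats 2000000 in
theorem validate_project_data_spec : Claim_equal_validate_project_data := by
  intro data _
  unfold Spec_validate_project_data validate_project_data validate_project_data_alt
  simp only [bChecks, aMissing, List.foldl, bStep, aGet, bGet, aFalsy]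
  cases h1 : (data.find? (fun p => p.1 == "project_type")).map (·.2) <;>
    cases h2 : (data.find? (fun p => p.1 == "timeline")).map (·.2) <;>
      cases h3 : (data.find? (fun p => p.1 == "difficulty")).map (·.2) <;>
        simp only [Option.getD_some, Option.getD_none] <;>
          split_ifs <;> simp_all
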